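-- pv_equiv track=rewrite | github.com/arpane4c5/batsman_pose_track | lib/utils/track_utils.py | get_track2frame
-- ===== SOURCE A (Python) =====
-- def get_track2frame(stroke_tracks):
--     '''Receive a list of lists corresponding to the poses in each frame of a
--     stroke and convert to a track_id/pose_id to frame no list. The length of
--     the list gives the length of the pose track.
--     Parameters:
--     -----------
--     stroke_tracks : list of list
--         The sublists contain pose ids in each frame of the stroke.
--
--     Returns:
--     --------
--     dict with key as pose_ids and values as list of frames_nos with tracks
--     eg., {pose_id1 : [f1, f2, f3, ...], ...}
--
--     '''
--     track2frame = {}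
--     for frm_no, frm_poses in  enumerate(stroke_tracks):
--         for pid in frm_poses:
--             if pid not in track2frame:
--                 track2frame[pid] = [frm_no]
--             else:
--                 track2frame[pid].append(frm_no)
--     return track2frame
-- ===== SOURCE B (Python) =====
-- def get_track2frame(stroke_tracks):
--     # Phase 1: collect the distinct pose ids in first-occurrence order.
--     pose_ids = []
--     for frm_poses in stroke_tracks:
--         for pid in frm_poses:
--             if pid not in pose_ids:
--                 pose_ids.append(pid)
--     # Phase 2: for each id, collect the frame number of every occurrence,
--     # scanning the frames in order.
--     return {pid: [frm_no
--                   for frm_no, frm_poses in enumerate(stroke_tracks)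
--                   for p in frm_poses if p == pid]
--             for pid in pose_ids}
-- ===== Notes on version B (the rewrite author's own statement) =====
-- stated objective: alternative
-- what changed: A builds the dict in one incremental pass appending frame numbers as it meets each pose id; B first collects the distinct pose ids in first-occurrence order, then builds each id's frame list by an independent filtering scan over the enumerated frames.
import Mathlib
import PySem

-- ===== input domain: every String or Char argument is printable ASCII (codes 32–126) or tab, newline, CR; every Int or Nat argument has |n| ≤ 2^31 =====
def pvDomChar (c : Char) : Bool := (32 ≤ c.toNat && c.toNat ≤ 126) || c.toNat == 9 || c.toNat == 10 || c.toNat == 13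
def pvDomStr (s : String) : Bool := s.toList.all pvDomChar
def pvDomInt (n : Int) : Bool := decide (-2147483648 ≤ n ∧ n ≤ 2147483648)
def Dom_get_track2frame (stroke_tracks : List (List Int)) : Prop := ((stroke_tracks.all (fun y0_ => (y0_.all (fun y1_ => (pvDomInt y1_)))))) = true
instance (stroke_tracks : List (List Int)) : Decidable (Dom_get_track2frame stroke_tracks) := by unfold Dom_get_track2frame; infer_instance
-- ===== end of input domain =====

-- B differs from A in decomposition (first collect the distinct pose ids, then one filtering scan
-- of the frames per id); same result, no speed claim. Objective: alternative.

-- ===== PORT A =====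
-- inner loop body of A: 'if pid not in track2frame: track2frame[pid] = [frm_no] else: track2frame[pid].append(frm_no)'
def aInner (frm_no : Int) (d : PySem.Dict Int (List Int)) (pid : Int) : PySem.Dict Int (List Int) :=
  if d.contains pid = false then d.insert pid [frm_no]
  else d.insert pid (d.getD pid [] ++ [frm_no])   -- in-place append, written as read-append-store

def get_track2frame (stroke_tracks : List (List Int)) : List (Int × List Int) :=
  ((PySem.List.enumerate stroke_tracks).foldl
      (fun d p => p.2.foldl (aInner p.1) d)
      PySem.Dict.empty).items

-- ===== PORT B =====
-- phase 1 inner body: 'if pid not in pose_ids: pose_ids.append(pid)'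
def addId (acc : List Int) (pid : Int) : List Int :=
  if pid ∈ acc then acc else acc ++ [pid]

def altKeys (stroke_tracks : List (List Int)) : List Int :=
  stroke_tracks.foldl (fun acc frm_poses => frm_poses.foldl addId acc) []

-- phase 2 comprehension: '[frm_no for frm_no, frm_poses in enumerate(stroke_tracks) for p in frm_poses if p == pid]'
def altVal (stroke_tracks : List (List Int)) (pid : Int) : List Int :=
  (PySem.List.enumerate stroke_tracks).foldl
    (fun acc p => p.2.foldl (fun acc2 q => if q == pid then acc2 ++ [p.1] else acc2) acc) []

def get_track2frame_alt (stroke_tracks : List (List Int)) : List (Int × List Int) :=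
  (altKeys stroke_tracks).map (fun pid => (pid, altVal stroke_tracks pid))

-- ===== PRECONDITION & SPEC =====
def Spec_get_track2frame (stroke_tracks : List (List Int)) (out : List (Int × List Int)) : Prop := out = get_track2frame_alt stroke_tracks
instance (stroke_tracks : List (List Int)) (out : List (Int × List Int)) : Decidable (Spec_get_track2frame stroke_tracks out) := by unfold Spec_get_track2frame; infer_instance

-- ===== CLAIM (what is proved, stated in full; the proofs are below) =====
def Claim_equal_get_track2frame : Prop := ∀ (stroke_tracks : List (List Int)), Dom_get_track2frame stroke_tracks → Spec_get_track2frame stroke_tracks (get_track2frame stroke_tracks)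

-- ===== LEMMAS AND PROOFS =====

lemma get?_mk_map (K : List Int) (v : Int → List Int) (a : Int) :
    (PySem.Dict.mk (K.map fun k => (k, v k))).get? a = if a ∈ K then some (v a) else none := by
  induction K with
  | nil => simp [PySem.Dict.get?]
  | cons b K ih =>
      simp only [List.map_cons, PySem.Dict.get?_mk_cons, ih, List.mem_cons]
      by_cases hba : b = a
      · subst hba; simp
      · simp [hba, Ne.symm hba, beq_iff_eq]

lemma contains_mk_map (K : List Int) (v : Int → List Int) (a : Int) :
    (PySem.Dict.mk (K.map fun k => (k, v k))).contains a = decide (a ∈ K) := by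
  rw [PySem.Dict.contains_eq_isSome_get?, get?_mk_map]
  by_cases h : a ∈ K <;> simp [h]

lemma inner_step (n : Int) (ps : List Int) :
    ∀ (K : List Int) (v : Int → List Int),
    ps.foldl (aInner n) (PySem.Dict.mk (K.map fun k => (k, v k)))
      = PySem.Dict.mk ((ps.foldl addId K).map
          (fun k => (k, (if k ∈ K then v k else []) ++ List.replicate (PySem.List.count ps k) n))) := by
  induction ps with
  | nil =>
      intro K v
      simp only [List.foldl_nil]
      congr 1
      refine List.map_congr_left (fun k hk => ?_)
      simp [hk, PySem.List.count]
  | cons a ps ih =>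
      intro K v
      simp only [List.foldl_cons]
      by_cases haK : a ∈ K
      · have hc : (PySem.Dict.mk (K.map fun k => (k, v k))).contains a = true := by
          simp [contains_mk_map, haK]
        have hstep : aInner n (PySem.Dict.mk (K.map fun k => (k, v k))) a
            = PySem.Dict.mk (K.map fun k => (k, if k = a then v a ++ [n] else v k)) := by
          unfold aInner
          rw [hc]
          simp only [Bool.true_eq_false, if_false]
          apply PySem.Dict.ext
          rw [PySem.Dict.items_insert_of_contains _ _ hc]
          have hg : (PySem.Dict.mk (K.map fun k => (k, v k))).getD a [] = v a := by
            simp [PySem.Dict.getD, PySem.Dict.get?_eq_none_iff_contains, get?_mk_map, haK]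
          rw [hg]
          simp only [List.map_map]
          refine List.map_congr_left (fun k hk => ?_)
          by_cases hka : k = a <;> simp [hka]
        rw [hstep, ih]
        have hK : addId K a = K := by simp [addId, haK]
        rw [hK]
        congr 1
        refine List.map_congr_left (fun k hk => ?_)
        by_cases hka : k = a
        · subst hka
          simp [haK, PySem.List.count, List.count_cons, List.append_assoc, List.replicate_succ]
        · simp [if_neg hka, PySem.List.count, List.count_cons]
          exact fun h => hka h.symm
      · have hc : (PySem.Dict.mk (K.map fun k => (k, v k))).contains a = false := by
          rw [contains_mk_map]; simp [haK]
        have hstep : aInner n (PySem.Dict.mk (K.map fun k => (k, v k))) a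
            = PySem.Dict.mk ((K ++ [a]).map fun k => (k, if k = a then [n] else v k)) := by
          unfold aInner
          rw [hc]
          rw [if_pos rfl]
          apply PySem.Dict.ext
          rw [PySem.Dict.items_insert_of_not_contains _ _ hc]
          simp only [List.map_append, List.map_cons, List.map_nil, if_pos rfl]
          congr 1
          refine List.map_congr_left (fun k hk => ?_)
          have : k ≠ a := fun h => haK (h ▸ hk)
          simp [this]
        rw [hstep, ih]
        have hK : addId K a = K ++ [a] := by simp [addId, haK]
        rw [hK]
        congr 1
        refine List.map_congr_left (fun k hk => ?_)
        by_cases hka : k = a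
        · subst hka
          simp [haK, PySem.List.count, List.count_cons, List.replicate_succ]
        · simp [hka, PySem.List.count, List.count_cons, List.mem_append, Ne.symm, hka]

def keysOf (E : List (Int × List Int)) : List Int :=
  E.foldl (fun K p => p.2.foldl addId K) []
def valOf (E : List (Int × List Int)) (pid : Int) : List Int :=
  E.foldl (fun acc p => acc ++ List.replicate (PySem.List.count p.2 pid) p.1) []

lemma mem_addId {x a : Int} {K : List Int} : x ∈ addId K a ↔ x ∈ K ∨ x = a := by
  unfold addId; split_ifs with h
  · constructor
    · exact fun hx => Or.inl hx
    · rintro (hx | rfl); exacts [hx, h]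
  · simp [List.mem_append]

lemma mem_foldl_addId (ps : List Int) (K : List Int) (x : Int) :
    x ∈ ps.foldl addId K ↔ x ∈ K ∨ x ∈ ps := by
  induction ps generalizing K with
  | nil => simp
  | cons a ps ih =>
      simp only [List.foldl_cons, ih, mem_addId, List.mem_cons]
      tauto

lemma mem_foldl_frames (E : List (Int × List Int)) (K : List Int) (x : Int) :
    x ∈ E.foldl (fun K p => p.2.foldl addId K) K ↔ x ∈ K ∨ ∃ p ∈ E, x ∈ p.2 := by
  induction E generalizing K with
  | nil => simp
  | cons e E ih =>
      simp only [List.foldl_cons, ih, mem_foldl_addId, List.mem_cons]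
      constructor
      · rintro ((h | h) | ⟨p, hp, hx⟩)
        exacts [Or.inl h, Or.inr ⟨e, Or.inl rfl, h⟩, Or.inr ⟨p, Or.inr hp, hx⟩]
      · rintro (h | ⟨p, (rfl | hp), hx⟩)
        exacts [Or.inl (Or.inl h), Or.inl (Or.inr hx), Or.inr ⟨p, hp, hx⟩]

lemma valOf_aux (x : Int) (E : List (Int × List Int)) (acc : List Int)
    (h : ∀ p ∈ E, x ∉ p.2) :
    E.foldl (fun acc p => acc ++ List.replicate (PySem.List.count p.2 x) p.1) acc = acc := by
  induction E generalizing acc with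
  | nil => rfl
  | cons e E ih =>
      have hx : x ∉ e.2 := h e (List.mem_cons_self)
      have : PySem.List.count e.2 x = 0 := by
        simp [PySem.List.count, List.count_eq_zero, hx]
      simp only [List.foldl_cons, this, List.replicate_zero, List.append_nil]
      exact ih _ (fun p hp => h p (List.mem_cons_of_mem _ hp))

lemma valOf_of_not_mem {E : List (Int × List Int)} {x : Int}
    (h : x ∉ keysOf E) : valOf E x = [] := by
  apply valOf_aux
  intro p hp hx
  exact h ((mem_foldl_frames E [] x).2 (Or.inr ⟨p, hp, hx⟩))

lemma outer (E : List (Int × List Int)) :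
    E.foldl (fun d p => p.2.foldl (aInner p.1) d) PySem.Dict.empty
      = PySem.Dict.mk ((keysOf E).map (fun k => (k, valOf E k))) := by
  induction E using List.reverseRecOn with
  | nil => rfl
  | append_singleton E e ih =>
      rw [List.foldl_append, List.foldl_cons, List.foldl_nil, ih, inner_step]
      have hK : keysOf (E ++ [e]) = e.2.foldl addId (keysOf E) := by
        simp [keysOf, List.foldl_append]
      rw [hK]
      congr 1
      refine List.map_congr_left (fun k hk => ?_)
      have hv : valOf (E ++ [e]) k = valOf E k ++ List.replicate (PySem.List.count e.2 k) e.1 := by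
        simp [valOf, List.foldl_append]
      rw [hv]
      by_cases hkE : k ∈ keysOf E
      · simp [hkE]
      · simp [hkE, valOf_of_not_mem hkE]

lemma altKeys_eq (st : List (List Int)) : altKeys st = keysOf (PySem.List.enumerate st) := by
  unfold altKeys keysOf
  conv_lhs => rw [← PySem.List.map_snd_enumerate st 0]
  rw [List.foldl_map]

lemma filter_foldl_eq_replicate (pid n : Int) (ps : List Int) (acc : List Int) :
    ps.foldl (fun acc2 q => if q == pid then acc2 ++ [n] else acc2) acc
      = acc ++ List.replicate (PySem.List.count ps pid) n := by
  induction ps generalizing acc with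
  | nil => simp [PySem.List.count]
  | cons a ps ih =>
      simp only [List.foldl_cons, ih]
      by_cases h : a = pid
      · simp [h, PySem.List.count, List.count_cons, List.append_assoc, List.replicate_succ]
      · have h2 : ¬ pid = a := fun hc => h hc.symm
        simp [h, h2, PySem.List.count, List.count_cons]

lemma altVal_eq (st : List (List Int)) (pid : Int) :
    altVal st pid = valOf (PySem.List.enumerate st) pid := by
  unfold altVal valOf
  have hf : (fun (acc : List Int) (p : Int × List Int) =>
        p.2.foldl (fun acc2 q => if q == pid then acc2 ++ [p.1] else acc2) acc)
      = (fun acc p => acc ++ List.replicate (PySem.List.count p.2 pid) p.1) := by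
    funext acc p
    exact filter_foldl_eq_replicate pid p.1 p.2 acc
  rw [hf]

-- ===== VERDICT (by name: the statement is the Claim_ definition above) =====
theorem get_track2frame_spec : Claim_equal_get_track2frame := by
  intro st _
  show get_track2frame st = get_track2frame_alt st
  unfold get_track2frame get_track2frame_alt
  rw [outer, altKeys_eq]
  have hf : (fun pid => (pid, altVal st pid))
      = (fun k : Int => (k, valOf (PySem.List.enumerate st) k)) :=
    funext fun k => by rw [altVal_eq]
  rw [hf]
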